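-- pv_equiv track=rewrite | github.com/cuadchris/code_wars | python/flick_switch.py | flick_switch
-- ===== SOURCE A (Python) =====
-- def flick_switch(lst):
--
--     flag = True
--     res = []
--
--     for i in lst:
--         if i == 'flick':
--             flag = not flag
--         res.append(flag)
--
--     return res
-- ===== SOURCE B (Python) =====
-- def flick_switch(lst):
--     res = []
--     state = True
--     run = 0
--     for x in lst:
--         if x == 'flick':
--             res.extend([state] * run)
--             state = not state
--             run = 1
--         else:
--             run += 1
--     res.extend([state] * run)
--     return res
-- ===== Notes on version B (the rewrite author's own statement) =====
-- stated objective: alternative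
-- what changed: B builds the result by run-length segments: it counts the run of pending positions sharing the current state and emits a whole replicated block only when a 'flick' toggles the state (plus one final block), instead of A's per-element flag toggle and append.
import Mathlib
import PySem

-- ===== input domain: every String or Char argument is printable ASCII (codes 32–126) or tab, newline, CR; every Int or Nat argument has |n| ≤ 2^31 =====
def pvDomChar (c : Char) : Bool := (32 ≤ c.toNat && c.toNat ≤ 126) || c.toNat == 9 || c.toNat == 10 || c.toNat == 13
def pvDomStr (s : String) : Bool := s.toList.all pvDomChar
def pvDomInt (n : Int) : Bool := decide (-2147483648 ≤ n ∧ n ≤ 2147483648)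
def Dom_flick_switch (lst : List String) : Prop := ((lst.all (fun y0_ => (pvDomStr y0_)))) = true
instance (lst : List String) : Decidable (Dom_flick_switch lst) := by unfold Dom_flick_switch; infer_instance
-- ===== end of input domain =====

-- B builds the result by run-length segments (replicated state blocks flushed at each 'flick') instead of A's per-element flag toggle and append; same O(n) cost, different construction.


-- ===== PORT A =====
def flick_switch (lst : List String) : List Bool :=
  (lst.foldl (fun (st : Bool × List Bool) i =>
      let flag := if i == "flick" then !st.1 else st.1
      (flag, st.2 ++ [flag])) (true, [])).2

-- ===== PORT B =====
-- [state] * run → List.replicate run state (run : Nat, always ≥ 0 in Source B); res.extend → ++.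
def flick_switch_alt (lst : List String) : List Bool :=
  let s := lst.foldl (fun (st : List Bool × Bool × Nat) x =>
      if x == "flick" then
        (st.1 ++ List.replicate st.2.2 st.2.1, !st.2.1, 1)
      else
        (st.1, st.2.1, st.2.2 + 1)) ([], true, 0)
  s.1 ++ List.replicate s.2.2 s.2.1

-- ===== PRECONDITION & SPEC =====
def Spec_flick_switch (lst : List String) (out : List Bool) : Prop := out = flick_switch_alt lst
instance (lst : List String) (out : List Bool) : Decidable (Spec_flick_switch lst out) := by unfold Spec_flick_switch; infer_instance

-- ===== CLAIM (what is proved, stated in full; the proofs are below) =====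
def Claim_equal_flick_switch : Prop := ∀ (lst : List String), Dom_flick_switch lst → Spec_flick_switch lst (flick_switch lst)

-- ===== LEMMAS AND PROOFS =====

-- A's fold only ever appends to its accumulator
theorem afold_acc (lst : List String) (flag : Bool) (acc : List Bool) :
    (lst.foldl (fun (st : Bool × List Bool) i =>
      let f := if i == "flick" then !st.1 else st.1
      (f, st.2 ++ [f])) (flag, acc)).2
    = acc ++ (lst.foldl (fun (st : Bool × List Bool) i =>
      let f := if i == "flick" then !st.1 else st.1
      (f, st.2 ++ [f])) (flag, [])).2 := by
  induction lst generalizing flag acc with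
  | nil => simp
  | cons x xs ih =>
    simp only [List.foldl_cons]
    conv_rhs => rw [ih]
    rw [ih]
    simp only [List.nil_append, List.append_assoc]

-- invariant linking B's run-length state to A's output
theorem bfold_inv (lst : List String) (res : List Bool) (state : Bool) (run : Nat) :
    (lst.foldl (fun (st : List Bool × Bool × Nat) x =>
      if x == "flick" then
        (st.1 ++ List.replicate st.2.2 st.2.1, !st.2.1, 1)
      else
        (st.1, st.2.1, st.2.2 + 1)) (res, state, run)).1
    ++ List.replicate
        (lst.foldl (fun (st : List Bool × Bool × Nat) x =>
          if x == "flick" then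
            (st.1 ++ List.replicate st.2.2 st.2.1, !st.2.1, 1)
          else
            (st.1, st.2.1, st.2.2 + 1)) (res, state, run)).2.2
        (lst.foldl (fun (st : List Bool × Bool × Nat) x =>
          if x == "flick" then
            (st.1 ++ List.replicate st.2.2 st.2.1, !st.2.1, 1)
          else
            (st.1, st.2.1, st.2.2 + 1)) (res, state, run)).2.1
    = res ++ List.replicate run state
        ++ (lst.foldl (fun (st : Bool × List Bool) i =>
              let f := if i == "flick" then !st.1 else st.1
              (f, st.2 ++ [f])) (state, [])).2 := by
  induction lst generalizing res state run with
  | nil => simp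
  | cons x xs ih =>
    simp only [List.foldl_cons]
    by_cases hx : x == "flick"
    · simp only [if_pos hx]
      rw [ih]
      conv_rhs => rw [afold_acc]
      simp only [List.replicate_one, List.nil_append, List.append_assoc]
    · simp only [if_neg hx]
      rw [ih]
      conv_rhs => rw [afold_acc]
      simp only [List.replicate_succ', List.nil_append, List.append_assoc]

-- ===== VERDICT (by name: the statement is the Claim_ definition above) =====
theorem flick_switch_spec : Claim_equal_flick_switch := by
  intro lst _
  show flick_switch lst = flick_switch_alt lst
  have h := bfold_inv lst [] true 0
  simp only [List.replicate_zero, List.nil_append, List.append_nil] at h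
  simp only [flick_switch, flick_switch_alt]
  exact h.symm
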